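-- pv_equiv track=rewrite | github.com/dplepage/danutils | sci/mappedarrayset.py | toFileName
-- ===== SOURCE A (Python) =====
-- def toFileName(arrname):
--     '''Escape an array name to make it a sensible filename'''
--     swaps = [
--     ('_','__'),
--     (' ','_s'),
--     ('.','_d')]
--     for a,b in swaps:
--         arrname = arrname.replace(a,b)
--     return arrname + '.dat'
-- ===== SOURCE B (Python) =====
-- def toFileName(arrname):
--     '''Escape an array name to make it a sensible filename'''
--     res = ''
--     for c in arrname:
--         if c == '_':
--             res += '__'
--         elif c == ' ':
--             res += '_s'
--         elif c == '.':
--             res += '_d'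
--         else:
--             res += c
--     return res + '.dat'
-- ===== Notes on version B (the rewrite author's own statement) =====
-- stated objective: alternative
-- what changed: Replaces A's three sequential whole-string replace() passes with a single pass that maps each character independently to its escape and then appends the fixed data-file suffix.
import Mathlib
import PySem

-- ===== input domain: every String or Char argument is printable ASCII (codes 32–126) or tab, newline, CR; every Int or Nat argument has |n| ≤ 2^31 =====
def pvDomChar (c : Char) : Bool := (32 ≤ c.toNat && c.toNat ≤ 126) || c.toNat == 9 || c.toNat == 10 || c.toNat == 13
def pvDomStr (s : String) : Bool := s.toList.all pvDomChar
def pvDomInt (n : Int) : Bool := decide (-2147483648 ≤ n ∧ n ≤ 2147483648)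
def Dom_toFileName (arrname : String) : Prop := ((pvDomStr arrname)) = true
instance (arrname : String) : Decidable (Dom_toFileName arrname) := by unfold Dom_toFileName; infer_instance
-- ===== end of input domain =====

-- B replaces A's three sequential whole-string replace passes with one per-character pass; alternative decomposition, same cost.

-- ===== PORT A =====
def toFileName (arrname : String) : String :=
  let swaps : List (String × String) := [("_", "__"), (" ", "_s"), (".", "_d")]
  let arrname := swaps.foldl (fun s ab => PySem.Str.replace s ab.1 ab.2) arrname
  arrname ++ ".dat"

-- ===== PORT B =====
-- per-character escape: '_'→'__', ' '→'_s', '.'→'_d', others unchanged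
def escChar (c : Char) : List Char :=
  if c = '_' then ['_', '_']
  else if c = ' ' then ['_', 's']
  else if c = '.' then ['_', 'd']
  else [c]

def toFileName_alt (arrname : String) : String :=
  String.ofList (arrname.toList.foldl (fun res c => res ++ escChar c) []) ++ ".dat"

-- ===== PRECONDITION & SPEC =====
def Spec_toFileName (arrname : String) (out : String) : Prop := out = toFileName_alt arrname
instance (arrname : String) (out : String) : Decidable (Spec_toFileName arrname out) := by unfold Spec_toFileName; infer_instance

-- ===== CLAIM (what is proved, stated in full; the proofs are below) =====
def Claim_equal_toFileName : Prop := ∀ (arrname : String), Dom_toFileName arrname → Spec_toFileName arrname (toFileName arrname)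

-- ===== LEMMAS AND PROOFS =====

-- single-character replace: the worker maps each char independently
theorem replace_go_single (a : Char) (new : List Char) :
    ∀ (fuel : Nat) (s acc : List Char), s.length ≤ fuel →
      PySem.Chars.replace.go [a] new fuel s acc
        = acc.reverse ++ s.flatMap (fun c => if c = a then new else [c]) := by
  intro fuel
  induction fuel with
  | zero =>
    intro s acc h
    have : s = [] := List.eq_nil_of_length_eq_zero (Nat.le_zero.mp h)
    subst this
    simp [PySem.Chars.replace.go]
  | succ n ih =>
    intro s acc h
    cases s with
    | nil => simp [PySem.Chars.replace.go]
    | cons c t =>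
      by_cases hc : c = a
      · subst hc
        have hpre : List.isPrefixOf [c] (c :: t) = true := by
          simp [List.isPrefixOf]
        rw [PySem.Chars.replace.go, if_pos hpre]
        simp only [List.length_cons] at h
        simp only [List.length_cons, List.length_nil, List.drop_succ_cons, List.drop_zero]
        rw [ih _ _ (by omega)]
        simp
      · have hpre : List.isPrefixOf [a] (c :: t) = false := by
          simp only [List.isPrefixOf, Bool.and_eq_false_iff, beq_eq_false_iff_ne, ne_eq]
          exact Or.inl fun h => hc h.symm
        rw [PySem.Chars.replace.go, if_neg (by simp [hpre])]
        simp only [List.length_cons] at h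
        rw [ih _ _ (by omega)]
        simp only [List.reverse_cons, List.flatMap_cons, if_neg hc, List.append_assoc,
          List.singleton_append]

theorem replace_single (a : Char) (new s : List Char) :
    PySem.Chars.replace s [a] new = s.flatMap (fun c => if c = a then new else [c]) := by
  rw [PySem.Chars.replace]
  simp only [List.isEmpty_cons, if_false, Bool.false_eq_true]
  exact replace_go_single a new s.length s [] (le_refl _)

-- ===== VERDICT (by name: the statement is the Claim_ definition above) =====
theorem toFileName_spec : Claim_equal_toFileName := by
  intro arrname _
  unfold Spec_toFileName toFileName toFileName_alt
  apply String.toList_inj.mp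
  simp only [String.toList_append, List.foldl_cons, List.foldl_nil,
    PySem.Str.toList_replace, PySem.List.foldl_append_eq_flatMap, List.nil_append,
    String.toList_ofList]
  congr 1
  show PySem.Chars.replace (PySem.Chars.replace (PySem.Chars.replace arrname.toList ['_'] ['_','_']) [' '] ['_','s']) ['.'] ['_','d'] = _
  rw [replace_single, replace_single, replace_single, List.flatMap_assoc, List.flatMap_assoc]
  apply List.flatMap_congr
  intro c _
  by_cases h1 : c = '_'
  · subst h1; decide
  · by_cases h2 : c = ' '
    · subst h2; decide
    · by_cases h3 : c = '.'
      · subst h3; decide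
      · simp [escChar, h1, h2, h3]
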